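-- pv_equiv track=rewrite | github.com/med-ayssar/JIT_NEST | models/jit_model.py | __groupByDistance
-- ===== SOURCE A (Python) =====
-- def __groupByDistance(items):
--     """Partition the list of ``items`` into a list of sequences, where the distance between two consecutive elements in the sequence is equal to one.
--
--         Parameters
--         ----------
--         items: list[int]
--             list of positions in the contiguous space.
--
--         Returns
--         -------
--         list[int]:
--             list of ordered sequences.
--     """
--     res = []
--     if len(items) == 1:
--         return [(items[0], items[0] + 1)]
--     else:
--         first = items[0]
--         last = first
--         for i in range(1, len(items)):
--             if items[i] - last == 1:
--                 last = items[i]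
--             else:
--                 res.append((first, last + 1))
--                 first = items[i]
--                 last = items[i]
--         res.append((first, last + 1))
--     return res
-- ===== SOURCE B (Python) =====
-- def __groupByDistance(items):
--     # Two-pass: find the break indices where consecutiveness fails, then emit
--     # one interval per slice between consecutive boundaries.
--     breaks = [i for i in range(1, len(items)) if items[i] - items[i - 1] != 1]
--     bounds = [0] + breaks + [len(items)]
--     return [(items[s], items[e - 1] + 1) for s, e in zip(bounds, bounds[1:])]
-- ===== Notes on version B (the rewrite author's own statement) =====
-- stated objective: alternative
-- what changed: Replaces A's single stateful accumulator loop (first/last registers, append on break) by a two-pass boundary decomposition: first compute the break indices where items[i]-items[i-1] != 1, then map each adjacent pair of boundaries to an interval.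
import Mathlib
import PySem

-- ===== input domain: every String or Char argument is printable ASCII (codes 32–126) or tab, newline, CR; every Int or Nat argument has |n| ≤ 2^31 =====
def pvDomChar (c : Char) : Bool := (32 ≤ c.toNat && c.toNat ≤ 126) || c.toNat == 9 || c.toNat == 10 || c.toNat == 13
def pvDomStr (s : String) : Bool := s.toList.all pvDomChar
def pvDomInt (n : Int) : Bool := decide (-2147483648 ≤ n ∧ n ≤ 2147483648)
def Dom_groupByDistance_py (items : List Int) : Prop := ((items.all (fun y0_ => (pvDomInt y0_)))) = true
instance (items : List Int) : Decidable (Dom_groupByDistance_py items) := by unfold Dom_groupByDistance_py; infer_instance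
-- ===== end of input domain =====

-- B replaces A's stateful first/last accumulator loop by a two-pass boundary decomposition
-- (find break indices, then emit one interval per adjacent boundary pair): alternative, same cost.


-- ===== PORT A =====
-- A's loop 'for i in range(1, len(items))' reads only items[i]; it is folded over the
-- tail elements of items (the same values in the same order) with the same state (res, first, last).
def pvStepA (st : List (Int × Int) × Int × Int) (xi : Int) : List (Int × Int) × Int × Int :=
  if xi - st.2.2 == 1 then (st.1, st.2.1, xi)
  else (st.1 ++ [(st.2.1, st.2.2 + 1)], xi, xi)

def groupByDistance_py (items : List Int) : List (Int × Int) :=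
  if items.length = 1 then [(items.headD 0, items.headD 0 + 1)]
  else
    match items with
    | [] => []   -- Python raises IndexError at items[0] here; excluded by Pre_
    | x :: rest =>
      let st := rest.foldl pvStepA ([], x, x)
      st.1 ++ [(st.2.1, st.2.2 + 1)]

-- ===== PORT B =====
def groupByDistance_py_alt (items : List Int) : List (Int × Int) :=
  let breaks := (List.range' 1 (items.length - 1)).filter
    (fun i => items.getD i 0 - items.getD (i - 1) 0 != 1)
  let bounds := 0 :: breaks ++ [items.length]
  (bounds.zip bounds.tail).map (fun se => (items.getD se.1 0, items.getD (se.2 - 1) 0 + 1))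

-- ===== PRECONDITION & SPEC =====
-- Pre_ excludes only the empty list, on which both A and B raise IndexError.
def Pre_groupByDistance_py (items : List Int) : Prop := items ≠ []
instance (items : List Int) : Decidable (Pre_groupByDistance_py items) := by
  unfold Pre_groupByDistance_py; infer_instance
def pvWitness_groupByDistance_py : List Int := [1, 2, 5]

def Spec_groupByDistance_py (items : List Int) (out : List (Int × Int)) : Prop := out = groupByDistance_py_alt items
instance (items : List Int) (out : List (Int × Int)) : Decidable (Spec_groupByDistance_py items out) := by unfold Spec_groupByDistance_py; infer_instance

-- ===== CLAIM =====
def Claim_equal_groupByDistance_py : Prop := ∀ (items : List Int), Dom_groupByDistance_py items → Pre_groupByDistance_py items → Spec_groupByDistance_py items (groupByDistance_py items)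

-- ===== LEMMAS AND PROOFS =====
-- canonical recursive grouping; both ports are proved equal to it
def pvGroups : Int → Int → List Int → List (Int × Int)
  | first, last, [] => [(first, last + 1)]
  | first, last, x :: rest =>
    if x - last == 1 then pvGroups first x rest
    else (first, last + 1) :: pvGroups x x rest

lemma pvA_fold (rest : List Int) : ∀ (res : List (Int × Int)) (first last : Int),
    (rest.foldl pvStepA (res, first, last)).1
      ++ [((rest.foldl pvStepA (res, first, last)).2.1,
           (rest.foldl pvStepA (res, first, last)).2.2 + 1)]
    = res ++ pvGroups first last rest := by
  induction rest with
  | nil => intro res first last; simp [pvGroups]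
  | cons x t ih =>
    intro res first last
    simp only [List.foldl_cons, pvStepA, pvGroups]
    by_cases h : x - last == 1
    · simp [h, ih]
    · simp [h, ih]

lemma pvA_eq (x : Int) (rest : List Int) :
    groupByDistance_py (x :: rest) = pvGroups x x rest := by
  cases rest with
  | nil => simp [groupByDistance_py, pvGroups]
  | cons y t =>
    have : (x :: y :: t).length = 1 ↔ False := by simp
    simp only [groupByDistance_py, List.length_cons]
    rw [if_neg (by omega)]
    exact pvA_fold (y :: t) [] x x

def pvBreaks (items : List Int) : List Nat :=
  (List.range' 1 (items.length - 1)).filter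
    (fun i => items.getD i 0 - items.getD (i - 1) 0 != 1)

def pvSetFirst (a : Int) : List (Int × Int) → List (Int × Int)
  | [] => []
  | (_, e) :: r => (a, e) :: r

lemma pvGroups_setFirst (t : List Int) : ∀ (a b l : Int),
    pvGroups a l t = pvSetFirst a (pvGroups b l t) := by
  induction t with
  | nil => intro a b l; simp [pvGroups, pvSetFirst]
  | cons z t ih =>
    intro a b l
    simp only [pvGroups]
    by_cases h : z - l == 1
    · simp only [h, if_true]; exact ih a b z
    · simp [h, pvSetFirst]

lemma pvBreaks_ge_one (items : List Int) : ∀ j ∈ pvBreaks items, 1 ≤ j := by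
  intro j hj
  exact (List.mem_range'_1.1 (List.mem_of_mem_filter hj)).1

lemma pvBounds_ge_one (items : List Int) (hne : items ≠ []) :
    ∀ j ∈ pvBreaks items ++ [items.length], 1 ≤ j := by
  intro j hj
  rcases List.mem_append.1 hj with h | h
  · exact pvBreaks_ge_one items j h
  · have hl : 0 < items.length := List.length_pos_iff.2 hne
    simp only [List.mem_singleton] at h
    omega

def pvF (items : List Int) (se : Nat × Nat) : Int × Int :=
  (items.getD se.1 0, items.getD (se.2 - 1) 0 + 1)

lemma pvAlt_eq (items : List Int) :
    groupByDistance_py_alt items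
      = ((0 :: pvBreaks items ++ [items.length]).zip (pvBreaks items ++ [items.length])).map
          (pvF items) := rfl

lemma pvBreaks_cons (x y : Int) (t : List Int) :
    pvBreaks (x :: y :: t)
      = (if (y - x != 1) = true then [1] else []) ++ (pvBreaks (y :: t)).map (· + 1) := by
  unfold pvBreaks
  have hlen : (x :: y :: t).length - 1 = t.length + 1 := by simp
  have hlen' : (y :: t).length - 1 = t.length := by simp
  rw [hlen, hlen', List.range'_succ]
  have h2 : List.range' 2 t.length = (List.range' 1 t.length).map (· + 1) := by
    rw [show (2:Nat) = 1 + 1 from rfl, ← List.map_add_range' (a := 1) 1 t.length 1]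
    exact (List.map_congr_left (fun a _ => by omega)).symm
  rw [h2, List.filter_cons, List.filter_map]
  have hmap : List.filter ((fun i => (x :: y :: t).getD i 0 - (x :: y :: t).getD (i - 1) 0 != 1)
        ∘ (· + 1)) (List.range' 1 t.length)
      = List.filter (fun i => (y :: t).getD i 0 - (y :: t).getD (i - 1) 0 != 1)
        (List.range' 1 t.length) := by
    apply List.filter_congr
    intro j hj
    have hj1 : 1 ≤ j := (List.mem_range'_1.1 hj).1
    obtain ⟨m, rfl⟩ : ∃ m, j = m + 1 := ⟨j - 1, by omega⟩
    simp [Function.comp]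
  rw [hmap]
  by_cases hxy : (y - x != 1) = true
  · simp only [List.getD_cons_succ, List.getD_cons_zero, Nat.sub_self] at *
    rw [if_pos (by simpa using hxy), if_pos hxy]
    rfl
  · simp only [List.getD_cons_succ, List.getD_cons_zero, Nat.sub_self] at *
    rw [if_neg (by simpa using hxy), if_neg hxy]
    rfl

lemma pvShiftPointwise (z : Int) (it : List Int) (l : List (Nat × Nat))
    (h : ∀ p ∈ l, 1 ≤ p.2) :
    (l.map (Prod.map (· + 1) (· + 1))).map (pvF (z :: it)) = l.map (pvF it) := by
  rw [List.map_map]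
  apply List.map_congr_left
  intro p hp
  obtain ⟨s, e⟩ := p
  have he : 1 ≤ e := h (s, e) hp
  obtain ⟨m, rfl⟩ : ∃ m, e = m + 1 := ⟨e - 1, by omega⟩
  simp [pvF, Prod.map]

lemma pvB_eq (x : Int) (rest : List Int) :
    groupByDistance_py_alt (x :: rest) = pvGroups x x rest := by
  induction rest generalizing x with
  | nil =>
    show groupByDistance_py_alt [x] = _
    simp [groupByDistance_py_alt, pvGroups, List.zip]
  | cons y t ih =>
    have hge := pvBounds_ge_one (y :: t) (by simp)
    have hmapf : (pvBreaks (y :: t)).map (· + 1) ++ [(x :: y :: t).length]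
        = (pvBreaks (y :: t) ++ [(y :: t).length]).map (· + 1) := by
      simp
    rw [pvAlt_eq, pvBreaks_cons]
    by_cases hxy : y - x = 1
    · -- consecutive: no new break; first interval of the tail result is extended down to x
      rw [if_neg (by simp [hxy])]
      have hG : pvGroups x x (y :: t) = pvGroups x y t := by simp [pvGroups, hxy]
      obtain ⟨c, cs, hL⟩ := List.exists_cons_of_ne_nil
        (show pvBreaks (y :: t) ++ [(y :: t).length] ≠ [] by simp)
      have hc1 : 1 ≤ c := hge c (by rw [hL]; exact List.mem_cons_self ..)
      obtain ⟨m, hm⟩ : ∃ m, c = m + 1 := ⟨c - 1, by omega⟩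
      have hcs : ∀ p ∈ (c :: cs).zip cs, 1 ≤ p.2 := by
        intro p hp
        exact hge p.2 (by rw [hL]; exact List.mem_cons_of_mem _ (List.of_mem_zip hp).2)
      rw [hG, pvGroups_setFirst t x y y, ← ih y, pvAlt_eq]
      simp only [List.nil_append, List.cons_append]
      rw [hmapf, hL, hm]
      simp only [List.map_cons, List.zip_cons_cons]
      rw [show pvF (y :: t) (0, m + 1) = ((y :: t).getD 0 0, (y :: t).getD m 0 + 1) from by
            simp [pvF]]
      simp only [pvSetFirst]
      rw [show (m + 1 + 1) :: List.map (fun x => x + 1) cs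
            = List.map (fun x => x + 1) ((m + 1) :: cs) from rfl,
          List.zip_map,
          pvShiftPointwise x (y :: t) _ (by rw [← hm]; exact hcs)]
      simp [pvF]
    · -- break between x and y: emit (x, x+1) and keep the tail result unchanged
      rw [if_pos (by simp [hxy])]
      have hG : pvGroups x x (y :: t) = (x, x + 1) :: pvGroups y y t := by
        simp [pvGroups, hxy]
      rw [hG, ← ih y, pvAlt_eq]
      simp only [List.nil_append, List.cons_append, List.zip_cons_cons, List.map_cons, List.length_cons]
      have e1 : (1 : Nat) :: (List.map (fun x => x + 1) (pvBreaks (y :: t)) ++ [t.length + 1 + 1])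
          = List.map (fun x => x + 1) (0 :: (pvBreaks (y :: t) ++ [t.length + 1])) := by simp
      have e2 : List.map (fun x => x + 1) (pvBreaks (y :: t)) ++ [t.length + 1 + 1]
          = List.map (fun x => x + 1) (pvBreaks (y :: t) ++ [t.length + 1]) := by simp
      rw [e1, e2, List.zip_map,
        pvShiftPointwise x (y :: t) _
          (fun p hp => hge p.2 (by simpa using (List.of_mem_zip hp).2))]
      simp [pvF]

-- ===== VERDICT =====
theorem groupByDistance_py_spec : Claim_equal_groupByDistance_py := by
  intro items _ hpre
  unfold Spec_groupByDistance_py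
  cases items with
  | nil => exact absurd rfl hpre
  | cons x rest => rw [pvA_eq, pvB_eq]
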